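-- pv_equiv track=rewrite | github.com/sankt-petersbug/shakesearch | parse.py | parse_works
-- ===== SOURCE A (Python) =====
-- import collections
-- import operator
-- from typing import (
--     Dict,
--     Iterator,
--     List,
-- )
--
-- def parse_works(titles: List[str], lines: Iterator[str]) -> Dict[str, str]:
--     current_title = titles[0]
--     titles_set = set(titles)
--     work_map = collections.defaultdict(list)
--     for line in lines:
--         line_stripped = line.strip()
--
--         if line_stripped == '* CONTENT NOTE (added in 2017) *':
--             break
--
--         if line_stripped in titles_set and line_stripped != current_title:
--             current_title = line_stripped
--             continue
--
--         work_map[current_title].append(line)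
--     works = [{'title': title, 'content': '\n'.join(content)} for title, content in work_map.items()]
--     works.sort(key=operator.itemgetter('title'))
--
--     return works
-- ===== SOURCE B (Python) =====
-- def parse_works(titles, lines):
--     SENTINEL = '* CONTENT NOTE (added in 2017) *'
--     # Pass 1: materialise the lines up to (not including) the content-note sentinel.
--     buf = []
--     for line in lines:
--         if line.strip() == SENTINEL:
--             break
--         buf.append(line)
--     titles_set = set(titles)
--     # Pass 2: cut buf into (title, segment) chunks at every title switch.
--     chunks = []
--     cur = titles[0]
--     seg = []
--     for line in buf:
--         s = line.strip()
--         if s in titles_set and s != cur: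
--             chunks.append((cur, seg))
--             cur, seg = s, []
--         else:
--             seg.append(line)
--     chunks.append((cur, seg))
--     # Pass 3: merge chunks of the same title, in order of first non-empty chunk.
--     groups = {}
--     for title, segment in chunks:
--         if segment:
--             groups[title] = groups.get(title, []) + segment
--     works = [{'title': t, 'content': '\n'.join(ls)} for t, ls in groups.items()]
--     works.sort(key=lambda d: d['title'])
--     return works
-- ===== Notes on version B (the rewrite author's own statement) =====
-- stated objective: alternative
-- what changed: A builds the per-title content incrementally in a defaultdict during one scan; B makes three separate passes: truncate at the sentinel, cut the line list into explicit (title, segment) chunks at title switches, then merge the chunks into a dict keyed by title.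
import Mathlib
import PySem

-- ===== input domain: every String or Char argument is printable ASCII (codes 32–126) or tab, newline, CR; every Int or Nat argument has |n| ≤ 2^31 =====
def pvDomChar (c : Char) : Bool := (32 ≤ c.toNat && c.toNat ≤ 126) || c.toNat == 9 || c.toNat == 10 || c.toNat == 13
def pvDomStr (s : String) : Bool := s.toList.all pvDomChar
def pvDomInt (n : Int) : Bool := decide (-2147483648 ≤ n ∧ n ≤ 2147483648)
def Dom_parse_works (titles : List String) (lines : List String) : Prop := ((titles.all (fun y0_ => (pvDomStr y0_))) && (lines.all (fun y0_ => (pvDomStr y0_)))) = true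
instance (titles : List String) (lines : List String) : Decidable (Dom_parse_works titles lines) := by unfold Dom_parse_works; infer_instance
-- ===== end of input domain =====

-- B replaces A's single-scan defaultdict accumulation by three passes (truncate at the
-- sentinel, cut into explicit (title, segment) chunks, merge chunks by title); same values.

def pvSentinel : String := "* CONTENT NOTE (added in 2017) *"

-- ===== PORT A =====
-- the for-loop of A: state = (current_title, work_map); break at sentinel; defaultdict append
def pvALoop (tset : PySem.Set String) (cur : String) (wm : PySem.Dict String (List String)) :
    List String → PySem.Dict String (List String)
  | [] => wm
  | line :: rest =>
    let s := PySem.Str.strip line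
    if s = pvSentinel then wm
    else if PySem.Set.contains tset s = true ∧ s ≠ cur then
      pvALoop tset s wm rest
    else
      pvALoop tset cur (wm.insert cur (wm.getD cur [] ++ [line])) rest

-- the final two lines of A: render items as dicts and sort by title
def pvRenderA (wm : PySem.Dict String (List String)) : List (List (String × String)) :=
  let works := wm.items.map (fun p => [("title", p.1), ("content", PySem.Str.join "\n" p.2)])
  PySem.List.sorted works (fun d => PySem.Dict.getD (PySem.Dict.mk d) "title" "") false

def parse_works (titles : List String) (lines : List String) : List (List (String × String)) :=
  match titles with
  | [] => []   -- Python raises IndexError on titles[0]; excluded by Pre_parse_works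
  | t0 :: _ =>
    let tset := PySem.Set.ofList titles
    pvRenderA (pvALoop tset t0 PySem.Dict.empty lines)

-- ===== PORT B =====
-- pass 1 of B: materialise lines up to the sentinel
def pvBTrunc : List String → List String
  | [] => []
  | l :: ls => if PySem.Str.strip l = pvSentinel then [] else l :: pvBTrunc ls

-- pass 2 of B: the chunk-cutting loop, state = (chunks, cur, seg)
def pvBStep (tset : PySem.Set String)
    (st : List (String × List String) × String × List String) (line : String) :
    List (String × List String) × String × List String :=
  let s := PySem.Str.strip line
  if PySem.Set.contains tset s = true ∧ s ≠ st.2.1 then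
    (st.1 ++ [(st.2.1, st.2.2)], s, [])
  else
    (st.1, st.2.1, st.2.2 ++ [line])

def pvBChunks (tset : PySem.Set String) (t0 : String) (buf : List String) :
    List (String × List String) :=
  let st := buf.foldl (pvBStep tset) ([], t0, [])
  st.1 ++ [(st.2.1, st.2.2)]

-- pass 3 of B: merge chunks into a dict keyed by title, skipping empty segments
def pvBGroup (g : PySem.Dict String (List String)) (chunks : List (String × List String)) :
    PySem.Dict String (List String) :=
  chunks.foldl (fun g c => if c.2 = [] then g else g.insert c.1 (g.getD c.1 [] ++ c.2)) g

-- the final two lines of B (same rendering code as A's)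
def pvRenderB (wm : PySem.Dict String (List String)) : List (List (String × String)) :=
  let works := wm.items.map (fun p => [("title", p.1), ("content", PySem.Str.join "\n" p.2)])
  PySem.List.sorted works (fun d => PySem.Dict.getD (PySem.Dict.mk d) "title" "") false

def parse_works_alt (titles : List String) (lines : List String) : List (List (String × String)) :=
  match titles with
  | [] => []   -- Python raises IndexError on titles[0]; excluded by Pre_parse_works
  | t0 :: _ =>
    let buf := pvBTrunc lines
    let tset := PySem.Set.ofList titles
    pvRenderB (pvBGroup PySem.Dict.empty (pvBChunks tset t0 buf))

-- ===== PRECONDITION & SPEC =====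
-- Pre_ excludes only empty 'titles', on which A (titles[0]) raises IndexError.
def Pre_parse_works (titles : List String) (lines : List String) : Prop := titles ≠ []
instance (titles : List String) (lines : List String) : Decidable (Pre_parse_works titles lines) := by unfold Pre_parse_works; infer_instance
def pvWitness_parse_works : List String × List String :=
  (["T1", "T2"], ["T1", "a", "T2", "b", "T1", "c"])

def Spec_parse_works (titles : List String) (lines : List String) (out : List (List (String × String))) : Prop := out = parse_works_alt titles lines
instance (titles : List String) (lines : List String) (out : List (List (String × String))) : Decidable (Spec_parse_works titles lines out) := by unfold Spec_parse_works; infer_instance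

-- ===== CLAIM (what is proved, stated in full; the proofs are below) =====
def Claim_equal_parse_works : Prop := ∀ (titles : List String) (lines : List String), Dom_parse_works titles lines → Pre_parse_works titles lines → Spec_parse_works titles lines (parse_works titles lines)

-- ===== LEMMAS AND PROOFS =====

-- the chunk list, written as a structural recursion (proof device shared by both sides)
def pvChunksOf (tset : PySem.Set String) (cur : String) : List String → List (String × List String)
  | [] => [(cur, [])]
  | l :: ls =>
    let s := PySem.Str.strip l
    if PySem.Set.contains tset s = true ∧ s ≠ cur then
      (cur, []) :: pvChunksOf tset s ls
    else
      pvMapHead (l :: ·) (pvChunksOf tset cur ls)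
where
  pvMapHead (f : List String → List String) : List (String × List String) → List (String × List String)
    | [] => []
    | (t, sg) :: r => (t, f sg) :: r

lemma pvChunksOf_head (tset : PySem.Set String) (cur : String) (ls : List String) :
    ∃ sg r, pvChunksOf tset cur ls = (cur, sg) :: r := by
  cases ls with
  | nil => exact ⟨[], [], rfl⟩
  | cons l ls =>
    simp only [pvChunksOf]
    split
    · exact ⟨[], _, rfl⟩
    · obtain ⟨sg, r, h⟩ := pvChunksOf_head tset cur ls
      exact ⟨l :: sg, r, by rw [h]; rfl⟩

lemma pvMapHead_nil_append (cs : List (String × List String)) :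
    pvChunksOf.pvMapHead (fun x => [] ++ x) cs = cs := by
  cases cs with
  | nil => rfl
  | cons c r => cases c; simp [pvChunksOf.pvMapHead]

lemma pvMapHead_comp (f g : List String → List String) (cs : List (String × List String)) :
    pvChunksOf.pvMapHead f (pvChunksOf.pvMapHead g cs) = pvChunksOf.pvMapHead (fun x => f (g x)) cs := by
  cases cs with
  | nil => rfl
  | cons c r => cases c; simp [pvChunksOf.pvMapHead]

-- B's foldl chunk loop computes pvChunksOf (with the pending segment spliced onto the head)
lemma pvBChunks_loop (tset : PySem.Set String) (ls : List String) :
    ∀ (chunks : List (String × List String)) (cur : String) (seg : List String),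
    (let st := ls.foldl (pvBStep tset) (chunks, cur, seg); st.1 ++ [(st.2.1, st.2.2)])
      = chunks ++ pvChunksOf.pvMapHead (seg ++ ·) (pvChunksOf tset cur ls) := by
  induction ls with
  | nil => intro chunks cur seg; simp [pvChunksOf, pvChunksOf.pvMapHead]
  | cons l ls ih =>
    intro chunks cur seg
    simp only [List.foldl_cons, pvBStep, pvChunksOf]
    split
    · rw [ih, pvMapHead_nil_append]
      simp [pvChunksOf.pvMapHead]
    · rw [ih, pvMapHead_comp]
      have : (fun x => seg ++ (l :: x)) = (fun x => (seg ++ [l]) ++ x) := by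
        funext x; simp
      rw [this]

lemma pvBChunks_eq (tset : PySem.Set String) (t0 : String) (buf : List String) :
    pvBChunks tset t0 buf = pvChunksOf tset t0 buf := by
  show (let st := buf.foldl (pvBStep tset) ([], t0, []); st.1 ++ [(st.2.1, st.2.2)]) = _
  rw [pvBChunks_loop, pvMapHead_nil_append]
  simp

-- A's scan equals B's grouping of the chunks of the truncated lines
lemma pvALoop_eq_group (tset : PySem.Set String) (lines : List String) :
    ∀ (cur : String) (wm : PySem.Dict String (List String)),
    pvALoop tset cur wm lines = pvBGroup wm (pvChunksOf tset cur (pvBTrunc lines)) := by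
  induction lines with
  | nil => intro cur wm; simp [pvALoop, pvBTrunc, pvChunksOf, pvBGroup]
  | cons l ls ih =>
    intro cur wm
    simp only [pvALoop, pvBTrunc]
    by_cases hs : PySem.Str.strip l = pvSentinel
    · simp [hs, pvChunksOf, pvBGroup]
    · simp only [hs, if_false]
      by_cases hb : PySem.Set.contains tset (PySem.Str.strip l) = true ∧ PySem.Str.strip l ≠ cur
      · rw [if_pos hb]
        simp only [pvChunksOf]
        rw [if_pos hb, ih]
        simp [pvBGroup]
      · rw [if_neg hb]
        simp only [pvChunksOf]
        rw [if_neg hb, ih]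
        obtain ⟨sg, r, hc⟩ := pvChunksOf_head tset cur (pvBTrunc ls)
        rw [hc]
        show pvBGroup (wm.insert cur (wm.getD cur [] ++ [l])) ((cur, sg) :: r)
           = pvBGroup wm (pvChunksOf.pvMapHead (l :: ·) ((cur, sg) :: r))
        simp only [pvChunksOf.pvMapHead, pvBGroup, List.foldl_cons]
        by_cases hsg : sg = []
        · simp [hsg]
        · simp only [hsg, if_false, List.cons_ne_nil]
          congr 1
          rw [PySem.Dict.getD_insert_self, PySem.Dict.insert_insert_self]
          simp

theorem pvRender_eq (wm : PySem.Dict String (List String)) : pvRenderA wm = pvRenderB wm := rfl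

-- ===== VERDICT (by name: the statement is the Claim_ definition above) =====
theorem parse_works_spec : Claim_equal_parse_works := by
  intro titles lines _ hpre
  unfold Spec_parse_works parse_works parse_works_alt
  cases titles with
  | nil => exact absurd rfl hpre
  | cons t0 ts =>
    simp only []
    rw [pvALoop_eq_group, ← pvBChunks_eq, pvRender_eq]
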